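-- pv_equiv track=rewrite | github.com/gpdwatkins/graph_colouring_with_RL | utils.py | generate_colour_groups_queen
-- ===== SOURCE A (Python) =====
-- def generate_colour_groups_queen(board_dim, offset):
-- #     Note this function only works for square boards (with side length board_dim)
-- #     in which board_dim mod 6 = 1 or 5
-- #     offset is a number 0<offset<board_dim s.t. using it as the offset between rows will give a valid colouring
-- #     for board_dim=7, the possible offset values are 2,3,4,5
--     col_group_to_uncoloured_vertices = {col_group:[] for col_group in range(board_dim)}
--     vertex_to_col_group = {}
--     for vertex in range(board_dim**2):
--         col = vertex%board_dim
--         row = int((vertex - col)/board_dim)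
--
--         col_group = (col-offset*row)%board_dim
--         col_group_to_uncoloured_vertices[col_group].append(vertex)
--         vertex_to_col_group[vertex] = col_group
--
--     return col_group_to_uncoloured_vertices, vertex_to_col_group
-- ===== SOURCE B (Python) =====
-- def generate_colour_groups_queen(board_dim, offset):
--     # Inverse construction: instead of labelling each vertex with its group,
--     # enumerate each group directly.  In row `row`, the unique vertex of group
--     # g sits in column (g + offset*row) % board_dim, so each group's list is
--     # produced wholesale in row order (= increasing vertex order).
--     n = board_dim
--     col_group_to_uncoloured_vertices = {}
--     label = {}
--     for g in range(n):
--         members = []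
--         for row in range(n):
--             v = row * n + (g + offset * row) % n
--             members.append(v)
--             label[v] = g
--         col_group_to_uncoloured_vertices[g] = members
--     vertex_to_col_group = {v: label[v] for v in range(n * n)}
--     return col_group_to_uncoloured_vertices, vertex_to_col_group
-- ===== Notes on version B (the rewrite author's own statement) =====
-- stated objective: alternative
-- what changed: A scans vertices 0..n^2-1 computing each vertex's colour group and appending into per-group lists; B inverts the map: it iterates group-by-group and row-by-row, computing directly the unique vertex of each group in each row via col = (g + offset*row) % n, so each group's list is constructed wholesale and the vertex->group dict is read back from the inverse construction.
import Mathlib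
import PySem

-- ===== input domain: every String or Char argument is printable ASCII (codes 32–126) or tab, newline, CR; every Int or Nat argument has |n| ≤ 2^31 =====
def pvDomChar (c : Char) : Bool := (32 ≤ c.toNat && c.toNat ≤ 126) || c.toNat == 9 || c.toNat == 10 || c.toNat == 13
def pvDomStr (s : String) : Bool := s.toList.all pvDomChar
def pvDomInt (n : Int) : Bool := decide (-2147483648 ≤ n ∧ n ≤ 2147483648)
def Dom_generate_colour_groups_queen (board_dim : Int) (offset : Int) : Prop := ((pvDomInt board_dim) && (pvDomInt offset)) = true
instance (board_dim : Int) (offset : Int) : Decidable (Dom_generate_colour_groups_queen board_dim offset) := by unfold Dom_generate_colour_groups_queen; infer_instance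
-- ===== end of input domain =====

-- B replaces A's vertex-major labelling loop by the inverse, group-major construction
-- (the unique vertex of group g in row r is r*n + (g + offset*r) % n); same cost, different algorithm.

-- ===== PORT A =====
-- int((vertex - col)/board_dim) is exact integer division (board_dim divides vertex - col), ported as floordiv.
def generate_colour_groups_queen (board_dim : Int) (offset : Int) : (List (Int × List Int)) × (List (Int × Int)) :=
  let cg0 : PySem.Dict Int (List Int) :=
    (PySem.List.pyRange 0 board_dim 1).foldl (fun d g => d.insert g []) PySem.Dict.empty
  let res :=
    (PySem.List.pyRange 0 (board_dim ^ 2) 1).foldl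
      (fun (st : PySem.Dict Int (List Int) × PySem.Dict Int Int) vertex =>
        let col := PySem.Int.mod vertex board_dim
        let row := PySem.Int.floordiv (vertex - col) board_dim
        let col_group := PySem.Int.mod (col - offset * row) board_dim
        (st.1.modify col_group [] (fun l => l ++ [vertex]), st.2.insert vertex col_group))
      (cg0, PySem.Dict.empty)
  (res.1.items, res.2.items)

-- ===== PORT B =====
-- label[v] in the final comprehension is ported as getD _ 0: on the admitted inputs (board_dim ≥ 0)
-- the label dict provably holds every v in range(board_dim*board_dim), so the default is never used.
def generate_colour_groups_queen_alt (board_dim : Int) (offset : Int) : (List (Int × List Int)) × (List (Int × Int)) :=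
  let res :=
    (PySem.List.pyRange 0 board_dim 1).foldl
      (fun (st : PySem.Dict Int (List Int) × PySem.Dict Int Int) g =>
        let inner :=
          (PySem.List.pyRange 0 board_dim 1).foldl
            (fun (p : List Int × PySem.Dict Int Int) row =>
              let v := row * board_dim + PySem.Int.mod (g + offset * row) board_dim
              (p.1 ++ [v], p.2.insert v g))
            ([], st.2)
        (st.1.insert g inner.1, inner.2))
      (PySem.Dict.empty, PySem.Dict.empty)
  let v2c :=
    (PySem.List.pyRange 0 (board_dim * board_dim) 1).foldl
      (fun e v => e.insert v (res.2.getD v 0)) PySem.Dict.empty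
  (res.1.items, v2c.items)

-- ===== PRECONDITION & SPEC =====
-- Pre_ excludes board_dim < 0, where A raises KeyError (the groups dict has no keys but board_dim**2 > 0 vertices are scanned).
def Pre_generate_colour_groups_queen (board_dim : Int) (offset : Int) : Prop := 0 ≤ board_dim
instance (board_dim : Int) (offset : Int) : Decidable (Pre_generate_colour_groups_queen board_dim offset) := by unfold Pre_generate_colour_groups_queen; infer_instance
def pvWitness_generate_colour_groups_queen : Int × Int := (7, 2)
def Spec_generate_colour_groups_queen (board_dim : Int) (offset : Int) (out : (List (Int × List Int)) × (List (Int × Int))) : Prop := out = generate_colour_groups_queen_alt board_dim offset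
instance (board_dim : Int) (offset : Int) (out : (List (Int × List Int)) × (List (Int × Int))) : Decidable (Spec_generate_colour_groups_queen board_dim offset out) := by unfold Spec_generate_colour_groups_queen; infer_instance

-- ===== CLAIM (what is proved, stated in full; the proofs are below) =====
def Claim_equal_generate_colour_groups_queen : Prop := ∀ (board_dim : Int) (offset : Int), Dom_generate_colour_groups_queen board_dim offset → Pre_generate_colour_groups_queen board_dim offset → Spec_generate_colour_groups_queen board_dim offset (generate_colour_groups_queen board_dim offset)

-- ===== LEMMAS AND PROOFS =====

-- A's colour-group label of vertex v (with n = board_dim)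
def pvLbl (n offset v : Int) : Int :=
  PySem.Int.mod (PySem.Int.mod v n - offset * PySem.Int.floordiv v n) n

-- B's vertex of group g in row `row`
def pvVtx (n offset g row : Int) : Int :=
  row * n + PySem.Int.mod (g + offset * row) n

-- ---- integer arithmetic layer ----

lemma mod_rc (n r c : Int) (hn : 0 < n) (hc0 : 0 ≤ c) (hcn : c < n) : PySem.Int.mod (r * n + c) n = c := by
  rw [PySem.Int.mod_eq_emod_of_pos hn, show r*n+c = c + n*r by ring, Int.add_mul_emod_self_left,
     Int.emod_eq_of_lt hc0 hcn]

lemma div_rc (n r c : Int) (hn : 0 < n) (hc0 : 0 ≤ c) (hcn : c < n) : PySem.Int.floordiv (r * n + c) n = r := by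
  rw [PySem.Int.floordiv_eq_iff_of_pos hn]; constructor <;> nlinarith

-- A's label (via row = (v - v%n)//n) equals pvLbl (via v//n) when 0 < n
lemma label_eq (n offset : Int) (hn : 0 < n) (v : Int) :
    PySem.Int.mod (PySem.Int.mod v n - offset * PySem.Int.floordiv (v - PySem.Int.mod v n) n) n
      = pvLbl n offset v := by
  have h := PySem.Int.floordiv_mul_add_mod v n
  have hsub : v - PySem.Int.mod v n = PySem.Int.floordiv v n * n := by omega
  have hdiv : PySem.Int.floordiv (PySem.Int.floordiv v n * n) n = PySem.Int.floordiv v n := by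
    rw [PySem.Int.floordiv_eq_iff_of_pos hn]
    constructor
    · exact le_refl _
    · nlinarith
  rw [hsub, hdiv, pvLbl]

lemma lbl_vtx (n offset g row : Int) (hn : 0 < n) (hg0 : 0 ≤ g) (hgn : g < n) :
    pvLbl n offset (pvVtx n offset g row) = g := by
  have hc0 : 0 ≤ PySem.Int.mod (g + offset * row) n := PySem.Int.mod_nonneg _ hn
  have hcn : PySem.Int.mod (g + offset * row) n < n := PySem.Int.mod_lt _ hn
  rw [pvLbl, pvVtx, mod_rc n row _ hn hc0 hcn, div_rc n row _ hn hc0 hcn,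
     PySem.Int.mod_eq_emod_of_pos hn, PySem.Int.mod_eq_emod_of_pos hn,
     Int.sub_emod, Int.emod_emod_of_dvd _ dvd_rfl, ← Int.sub_emod,
     show g + offset*row - offset*row = g by ring, Int.emod_eq_of_lt hg0 hgn]

lemma mod_shift_inj (n offset r c g : Int) (hn : 0 < n) (hc0 : 0 ≤ c) (hcn : c < n) (hg0 : 0 ≤ g) (hgn : g < n) :
    (PySem.Int.mod (c - offset * r) n = g ↔ c = PySem.Int.mod (g + offset * r) n) := by
  rw [PySem.Int.mod_eq_emod_of_pos hn, PySem.Int.mod_eq_emod_of_pos hn]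
  constructor
  · intro h
    have : (g + offset*r) % n = (c - offset*r + offset*r) % n := by
      rw [Int.add_emod, ← h, Int.emod_emod_of_dvd _ dvd_rfl, ← Int.add_emod]
    rw [this, show c - offset*r + offset*r = c by ring, Int.emod_eq_of_lt hc0 hcn]
  · intro h
    subst h
    rw [Int.sub_emod, Int.emod_emod_of_dvd _ dvd_rfl, ← Int.sub_emod,
       show g + offset*r - offset*r = g by ring, Int.emod_eq_of_lt hg0 hgn]

lemma lbl_bounds (n offset v : Int) (hn : 0 < n) : 0 ≤ pvLbl n offset v ∧ pvLbl n offset v < n :=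
  ⟨PySem.Int.mod_nonneg _ hn, PySem.Int.mod_lt _ hn⟩

lemma vtx_inj (n offset g g' row row' : Int) (hn : 0 < n) (hg : 0 ≤ g ∧ g < n) (hg' : 0 ≤ g' ∧ g' < n)
    (h : pvVtx n offset g row = pvVtx n offset g' row') : g = g' ∧ row = row' := by
  have hc0 : 0 ≤ PySem.Int.mod (g + offset * row) n := PySem.Int.mod_nonneg _ hn
  have hcn : PySem.Int.mod (g + offset * row) n < n := PySem.Int.mod_lt _ hn
  have hc0' : 0 ≤ PySem.Int.mod (g' + offset * row') n := PySem.Int.mod_nonneg _ hn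
  have hcn' : PySem.Int.mod (g' + offset * row') n < n := PySem.Int.mod_lt _ hn
  have hrow : row = row' := by
    have h1 := div_rc n row _ hn hc0 hcn
    have h2 := div_rc n row' _ hn hc0' hcn'
    rw [pvVtx, pvVtx] at h
    rw [← h] at h2; rw [h1] at h2; exact h2
  subst hrow
  have := congrArg (pvLbl n offset) h
  rw [lbl_vtx n offset g row hn hg.1 hg.2, lbl_vtx n offset g' row hn hg'.1 hg'.2] at this
  exact ⟨this, rfl⟩

-- ---- range decomposition ----

lemma range_shift (x m : Int) :
    PySem.List.pyRange x (x + m) 1 = (PySem.List.pyRange 0 m 1).map (fun c => x + c) := by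
  rw [PySem.List.pyRange_one, PySem.List.pyRange_one]
  simp [List.map_map, Function.comp]

lemma range_mul (a m : Int) (ha : 0 ≤ a) (hm : 0 ≤ m) :
    PySem.List.pyRange 0 (a * m) 1
      = (PySem.List.pyRange 0 a 1).flatMap
          (fun r => (PySem.List.pyRange 0 m 1).map (fun c => r * m + c)) := by
  induction a, ha using Int.le_induction with
  | base => simp [PySem.List.pyRange_one_eq_nil]
  | succ a ha ih =>
    have h1 : (0:Int) ≤ a * m := by positivity
    have h2 : a * m ≤ (a+1) * m := by nlinarith
    rw [PySem.List.pyRange_one_append 0 (a*m) ((a+1)*m) h1 h2,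
        PySem.List.pyRange_one_succ_right ha, List.flatMap_append, ← ih]
    congr 1
    simp only [List.flatMap_cons, List.flatMap_nil, List.append_nil]
    rw [show (a+1)*m = a*m + m by ring, range_shift]

-- the vertices of group g, in increasing order, are exactly B's row walk
lemma filter_eq_walk (n offset g : Int) (hn : 0 < n) (hg0 : 0 ≤ g) (hgn : g < n) :
    (PySem.List.pyRange 0 (n * n) 1).filter (fun v => pvLbl n offset v == g)
      = (PySem.List.pyRange 0 n 1).map (pvVtx n offset g) := by
  rw [range_mul n n (le_of_lt hn) (le_of_lt hn), List.filter_flatMap]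
  have hrow : ∀ r ∈ PySem.List.pyRange 0 n 1,
      ((PySem.List.pyRange 0 n 1).map (fun c => r * n + c)).filter (fun v => pvLbl n offset v == g)
        = [pvVtx n offset g r] := by
    intro r _
    rw [List.filter_map]
    have hc0 : 0 ≤ PySem.Int.mod (g + offset * r) n := PySem.Int.mod_nonneg _ hn
    have hcn : PySem.Int.mod (g + offset * r) n < n := PySem.Int.mod_lt _ hn
    have hcong : (PySem.List.pyRange 0 n 1).filter ((fun v => pvLbl n offset v == g) ∘ (fun c => r * n + c))
        = (PySem.List.pyRange 0 n 1).filter (fun c => c == PySem.Int.mod (g + offset * r) n) := by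
      apply List.filter_congr
      intro c hc
      rw [PySem.List.mem_pyRange_one] at hc
      simp only [Function.comp]
      rw [show pvLbl n offset (r * n + c) = PySem.Int.mod (c - offset * r) n by
            rw [pvLbl, mod_rc n r c hn hc.1 hc.2, div_rc n r c hn hc.1 hc.2]]
      rw [Bool.eq_iff_iff, beq_iff_eq, beq_iff_eq]
      exact mod_shift_inj n offset r c g hn hc.1 hc.2 hg0 hgn
    rw [hcong, List.filter_beq,
        List.count_eq_one_of_mem (PySem.List.nodup_pyRange_one 0 n)
          (by rw [PySem.List.mem_pyRange_one]; exact ⟨hc0, hcn⟩)]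
    rfl
  calc (PySem.List.pyRange 0 n 1).flatMap
        (fun r => ((PySem.List.pyRange 0 n 1).map (fun c => r * n + c)).filter (fun v => pvLbl n offset v == g))
      = (PySem.List.pyRange 0 n 1).flatMap (fun r => [pvVtx n offset g r]) := List.flatMap_congr hrow
    _ = (PySem.List.pyRange 0 n 1).map (pvVtx n offset g) := List.map_eq_flatMap.symm

-- ---- loop-shape lemmas ----

-- A's fused loop splits into two independent folds
lemma fused_split (f : Int → Int) (vs : List Int)
    (d0 : PySem.Dict Int (List Int)) (e0 : PySem.Dict Int Int) :
    vs.foldl (fun (st : PySem.Dict Int (List Int) × PySem.Dict Int Int) v =>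
        (st.1.modify (f v) [] (fun l => l ++ [v]), st.2.insert v (f v))) (d0, e0)
      = (vs.foldl (fun d v => d.modify (f v) [] (fun l => l ++ [v])) d0,
         vs.foldl (fun e v => e.insert v (f v)) e0) := by
  induction vs generalizing d0 e0 with
  | nil => rfl
  | cons x xs ih => simp [List.foldl, ih]

-- B's inner loop splits into the members list and the label inserts
lemma inner_split (n offset g : Int) (l : List Int) (acc : List Int) (e : PySem.Dict Int Int) :
    l.foldl (fun (p : List Int × PySem.Dict Int Int) row =>
        (p.1 ++ [row * n + PySem.Int.mod (g + offset * row) n],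
         p.2.insert (row * n + PySem.Int.mod (g + offset * row) n) g)) (acc, e)
      = (acc ++ l.map (pvVtx n offset g),
         l.foldl (fun e row => e.insert (pvVtx n offset g row) g) e) := by
  induction l generalizing acc e with
  | nil => simp
  | cons x xs ih => simp [List.foldl, ih, pvVtx]

-- a fold whose two components evolve independently splits
lemma pair_split {α β γ : Type} (l : List α) (F : β → α → β) (G : γ → α → γ) (b : β) (c : γ) :
    l.foldl (fun st x => (F st.1 x, G st.2 x)) (b, c) = (l.foldl F b, l.foldl G c) := by
  induction l generalizing b c with
  | nil => rfl
  | cons x xs ih => simp [List.foldl, ih]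

-- a modify-keyed loop is the pair-list grouping loop
lemma modify_pairs (h : Int → Int) (l : List Int) (d : PySem.Dict Int (List Int)) :
    l.foldl (fun d v => d.modify (h v) [] (fun xs => xs ++ [v])) d
      = (l.map (fun v => (h v, v))).foldl (fun d p => d.modify p.1 [] (fun xs => xs ++ [p.2])) d := by
  induction l generalizing d with
  | nil => rfl
  | cons x xs ih => simp [List.foldl, ih]

-- an insert loop keyed through a map is the plain pair-list insert loop
lemma insert_pairs (K : Int → Int → Int) (g : Int) (rows : List Int) (e : PySem.Dict Int Int) :
    rows.foldl (fun e row => e.insert (K g row) g) e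
      = (rows.map (fun row => (K g row, g))).foldl (fun e p => e.insert p.1 p.2) e := by
  induction rows generalizing e with
  | nil => rfl
  | cons r rs ih => simp [List.foldl, ih]

-- the nested label loop is a single insert loop over the pair list
lemma nested_flat (K : Int → Int → Int) (gs rows : List Int) (e : PySem.Dict Int Int) :
    gs.foldl (fun e g => rows.foldl (fun e row => e.insert (K g row) g) e) e
      = (gs.flatMap (fun g => rows.map (fun row => (K g row, g)))).foldl
          (fun e p => e.insert p.1 p.2) e := by
  induction gs generalizing e with
  | nil => rfl
  | cons g gs ih =>
    simp only [List.flatMap_cons, List.foldl_append, List.foldl_cons, ih]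
    congr 1
    exact insert_pairs K g rows e

-- a dict built by inserting [] everywhere reads [] everywhere
lemma getD_insert_nil (l : List Int) (d : PySem.Dict Int (List Int))
    (hd : ∀ k, d.getD k [] = []) (k : Int) :
    (l.foldl (fun d g => d.insert g ([]:List Int)) d).getD k [] = [] := by
  induction l generalizing d with
  | nil => exact hd k
  | cons x xs ih =>
    refine ih _ (fun k' => ?_)
    rw [PySem.Dict.getD_insert]
    split <;> [rfl; exact hd k']

-- ===== VERDICT (by name: the statement is the Claim_ definition above) =====
theorem generate_colour_groups_queen_spec : Claim_equal_generate_colour_groups_queen := by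
  intro n offset _ hpre
  unfold Spec_generate_colour_groups_queen
  rcases eq_or_lt_of_le hpre with hn | hn
  · rw [← hn]; rfl
  · -- 0 < n
    have hrowsnd : (PySem.List.pyRange 0 n 1).Nodup := PySem.List.nodup_pyRange_one 0 n
    have hvsnd : (PySem.List.pyRange 0 (n*n) 1).Nodup := PySem.List.nodup_pyRange_one 0 (n*n)
    have hmemrows : ∀ g, g ∈ PySem.List.pyRange 0 n 1 ↔ 0 ≤ g ∧ g < n := by
      intro g; rw [PySem.List.mem_pyRange_one]
    -- the label dict B builds
    have hL :
        ((PySem.List.pyRange 0 n 1).foldl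
          (fun e g => (PySem.List.pyRange 0 n 1).foldl
            (fun e row => e.insert (pvVtx n offset g row) g) e) PySem.Dict.empty).items
        = (PySem.List.pyRange 0 n 1).flatMap
            (fun g => (PySem.List.pyRange 0 n 1).map (fun row => (pvVtx n offset g row, g))) := by
      rw [nested_flat (pvVtx n offset)]
      have hnd : (((PySem.List.pyRange 0 n 1).flatMap
          (fun g => (PySem.List.pyRange 0 n 1).map (fun row => (pvVtx n offset g row, g)))).map
            (fun p => p.1)).Nodup := by
        rw [List.map_flatMap]
        rw [List.nodup_flatMap]
        constructor
        · intro g hg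
          simp only [List.map_map]
          refine List.Nodup.map_on ?_ hrowsnd
          intro r hr r' hr' hEq
          simp only [Function.comp] at hEq
          exact (vtx_inj n offset g g r r' hn ((hmemrows g).1 hg) ((hmemrows g).1 hg) hEq).2
        · refine List.Pairwise.imp_of_mem ?_ (List.Nodup.pairwise_of_forall_ne hrowsnd (fun a _ b _ h => h))
          intro a b ha hb hne x hxa hxb
          simp only [List.map_map, List.mem_map, Function.comp] at hxa hxb
          obtain ⟨r, _, hr⟩ := hxa
          obtain ⟨r', _, hr'⟩ := hxb
          exact hne (vtx_inj n offset a b r r' hn ((hmemrows a).1 ha) ((hmemrows b).1 hb)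
            (hr.trans hr'.symm)).1
      rw [PySem.Dict.items_foldl_insert_fresh
          ((PySem.List.pyRange 0 n 1).flatMap
            (fun g => (PySem.List.pyRange 0 n 1).map (fun row => (pvVtx n offset g row, g))))
          (fun (p : Int × Int) => p.1) (fun (p : Int × Int) => p.2) PySem.Dict.empty
          (fun a _ => PySem.Dict.contains_empty _) hnd]
      simp [PySem.Dict.empty]
    have hLkeysnd :
        ((PySem.List.pyRange 0 n 1).foldl
          (fun e g => (PySem.List.pyRange 0 n 1).foldl
            (fun e row => e.insert (pvVtx n offset g row) g) e) PySem.Dict.empty).keys.Nodup := by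
      show (PySem.Dict.items _ |>.map (fun p => p.1)).Nodup
      rw [hL, List.map_flatMap, List.nodup_flatMap]
      constructor
      · intro g hg
        simp only [List.map_map]
        refine List.Nodup.map_on ?_ hrowsnd
        intro r hr r' hr' hEq
        simp only [Function.comp] at hEq
        exact (vtx_inj n offset g g r r' hn ((hmemrows g).1 hg) ((hmemrows g).1 hg) hEq).2
      · refine List.Pairwise.imp_of_mem ?_ (List.Nodup.pairwise_of_forall_ne hrowsnd (fun a _ b _ h => h))
        intro a b ha hb hne x hxa hxb
        simp only [List.map_map, List.mem_map, Function.comp] at hxa hxb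
        obtain ⟨r, _, hr⟩ := hxa
        obtain ⟨r', _, hr'⟩ := hxb
        exact hne (vtx_inj n offset a b r r' hn ((hmemrows a).1 ha) ((hmemrows b).1 hb)
          (hr.trans hr'.symm)).1
    -- every scanned vertex is in the label dict, with its A-label
    have hgetD : ∀ v ∈ PySem.List.pyRange 0 (n*n) 1,
        ((PySem.List.pyRange 0 n 1).foldl
          (fun e g => (PySem.List.pyRange 0 n 1).foldl
            (fun e row => e.insert (pvVtx n offset g row) g) e) PySem.Dict.empty).getD v 0
        = pvLbl n offset v := by
      intro v hv
      rw [PySem.List.mem_pyRange_one] at hv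
      have hr0 : 0 ≤ PySem.Int.floordiv v n := by
        rw [PySem.Int.le_floordiv_iff_mul_le hn]
        simpa using hv.1
      have hrn : PySem.Int.floordiv v n < n := by
        rw [PySem.Int.floordiv_lt_iff_lt_mul hn]; exact hv.2
      have hgb := lbl_bounds n offset v hn
      have hmem : (v, pvLbl n offset v) ∈
          ((PySem.List.pyRange 0 n 1).foldl
            (fun e g => (PySem.List.pyRange 0 n 1).foldl
              (fun e row => e.insert (pvVtx n offset g row) g) e) PySem.Dict.empty).items := by
        rw [hL, List.mem_flatMap]
        refine ⟨pvLbl n offset v, (hmemrows _).2 hgb, ?_⟩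
        rw [List.mem_map]
        refine ⟨PySem.Int.floordiv v n, (hmemrows _).2 ⟨hr0, hrn⟩, ?_⟩
        have hc : PySem.Int.mod v n = PySem.Int.mod (pvLbl n offset v + offset * PySem.Int.floordiv v n) n := by
          refine (mod_shift_inj n offset (PySem.Int.floordiv v n) (PySem.Int.mod v n)
            (pvLbl n offset v) hn (PySem.Int.mod_nonneg _ hn) (PySem.Int.mod_lt _ hn)
            hgb.1 hgb.2).mp ?_
          rfl
        have hvm := PySem.Int.floordiv_mul_add_mod v n
        rw [pvVtx, ← hc]
        exact Prod.ext (by omega) rfl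
      exact PySem.Dict.getD_of_mem_items _ hmem hLkeysnd 0
    -- the initial group dict
    have hcg0items :
        ((PySem.List.pyRange 0 n 1).foldl (fun d g => d.insert g ([]:List Int)) PySem.Dict.empty).items
          = (PySem.List.pyRange 0 n 1).map (fun g => (g, ([]:List Int))) := by
      rw [PySem.Dict.items_foldl_insert_fresh _ (fun g => g) (fun _ => []) PySem.Dict.empty
          (fun a _ => PySem.Dict.contains_empty _) (by simpa using hrowsnd)]
      simp [PySem.Dict.empty]
    have hcg0keys :
        ((PySem.List.pyRange 0 n 1).foldl (fun d g => d.insert g ([]:List Int)) PySem.Dict.empty).keys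
          = PySem.List.pyRange 0 n 1 := by
      show (PySem.Dict.items _ |>.map (fun p => p.1)) = _
      rw [hcg0items, List.map_map]
      exact List.map_id _
    -- unfold both ports and split the loops
    simp only [generate_colour_groups_queen, generate_colour_groups_queen_alt, pow_two,
      label_eq n offset hn, inner_split, List.nil_append]
    rw [fused_split (pvLbl n offset),
        pair_split (PySem.List.pyRange 0 n 1)
          (fun (d : PySem.Dict Int (List Int)) g =>
            d.insert g ((PySem.List.pyRange 0 n 1).map (pvVtx n offset g)))
          (fun (e : PySem.Dict Int Int) g =>
            (PySem.List.pyRange 0 n 1).foldl (fun e row => e.insert (pvVtx n offset g row) g) e)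
          PySem.Dict.empty PySem.Dict.empty]
    dsimp only
    -- the group dict A builds
    have hkeysA :
        ((PySem.List.pyRange 0 (n*n) 1).foldl
          (fun d v => d.modify (pvLbl n offset v) [] (fun l => l ++ [v]))
          ((PySem.List.pyRange 0 n 1).foldl (fun d g => d.insert g ([]:List Int)) PySem.Dict.empty)).keys
          = PySem.List.pyRange 0 n 1 := by
      rw [PySem.Dict.keys_foldl_modify_key _ (pvLbl n offset) [] (fun _ v => fun l => l ++ [v]) _,
          hcg0keys, PySem.Set.update_eq_append_filter]
      have hfil : (PySem.Set.ofList ((PySem.List.pyRange 0 (n*n) 1).map (pvLbl n offset))).filter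
          (fun y => !(PySem.Set.contains (PySem.List.pyRange 0 n 1) y)) = [] := by
        rw [List.filter_eq_nil_iff]
        intro y hy
        rw [PySem.Set.mem_ofList, List.mem_map] at hy
        obtain ⟨v, _, hv⟩ := hy
        simp only [Bool.not_eq_true', Bool.not_eq_false]
        rw [← hv, PySem.Set.contains_iff, hmemrows]
        exact lbl_bounds n offset v hn
      rw [hfil, List.append_nil]
    have hnodupA : ((PySem.List.pyRange 0 (n*n) 1).foldl
          (fun d v => d.modify (pvLbl n offset v) [] (fun l => l ++ [v]))
          ((PySem.List.pyRange 0 n 1).foldl (fun d g => d.insert g ([]:List Int)) PySem.Dict.empty)).keys.Nodup := by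
      rw [hkeysA]; exact hrowsnd
    refine Prod.ext ?_ ?_
    · -- group lists
      rw [PySem.Dict.items_eq_map_keys _ hnodupA [], hkeysA,
          PySem.Dict.items_foldl_insert_fresh (PySem.List.pyRange 0 n 1) (fun (g : Int) => g)
            (fun g => (PySem.List.pyRange 0 n 1).map (pvVtx n offset g)) PySem.Dict.empty
            (fun a _ => PySem.Dict.contains_empty _) (by simpa using hrowsnd)]
      simp only [PySem.Dict.empty, List.nil_append]
      apply List.map_congr_left
      intro g hg
      rw [hmemrows] at hg
      refine Prod.ext rfl ?_
      show (List.foldl (fun d v => d.modify (pvLbl n offset v) [] fun l => l ++ [v])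
        (List.foldl (fun d g => d.insert g []) PySem.Dict.empty (PySem.List.pyRange 0 n 1))
        (PySem.List.pyRange 0 (n*n) 1)).getD g [] = _
      rw [modify_pairs (pvLbl n offset), PySem.Dict.getD_foldl_modify_append,
          getD_insert_nil (PySem.List.pyRange 0 n 1) PySem.Dict.empty
            (fun k => PySem.Dict.getD_empty k []) g,
          List.filter_map]
      simp only [Function.comp_def, List.map_map, List.nil_append]
      simpa using filter_eq_walk n offset g hn hg.1 hg.2
    · -- vertex labels
      rw [PySem.Dict.items_foldl_insert_fresh (PySem.List.pyRange 0 (n*n) 1) (fun (v : Int) => v)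
            (pvLbl n offset) PySem.Dict.empty
            (fun a _ => PySem.Dict.contains_empty _) (by simpa using hvsnd),
          PySem.Dict.items_foldl_insert_fresh (PySem.List.pyRange 0 (n*n) 1) (fun (v : Int) => v)
            (fun v => (List.foldl (fun e g => List.foldl (fun e row => e.insert (pvVtx n offset g row) g) e
                (PySem.List.pyRange 0 n 1)) PySem.Dict.empty (PySem.List.pyRange 0 n 1)).getD v 0)
            PySem.Dict.empty
            (fun a _ => PySem.Dict.contains_empty _) (by simpa using hvsnd)]
      apply List.map_congr_left
      intro v hv
      exact Prod.ext rfl (hgetD v hv).symm
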